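-- pv_equiv track=rewrite | github.com/garturbian/pathway | retrieve_learning.py | format_clipboard_output
-- ===== SOURCE A (Python) =====
-- def format_clipboard_output(student_name, words):
--     """Format the output for clipboard."""
--     if not words:
--         return f"No learning words found for {student_name}."
--
--     # Group words by step and level
--     grouped = {}
--     for word, step, level, rank in words:
--         key = (step, level)
--         if key not in grouped:
--             grouped[key] = []
--         grouped[key].append(word)
--
--     # Format output
--     lines = [f"Currently Learning — {student_name}"]
--
--     for (step, level), word_list in sorted(grouped.items()):
--         start_rank = ((step - 1) * 100) + ((level - 1) * 20) + 1
--         end_rank = start_rank + 19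
--         lines.append(f"\nStep {step} - Level {level} (Ranks {start_rank}–{end_rank}):")
--         lines.append(", ".join(word_list))
--
--     return "\n".join(lines)
-- ===== SOURCE B (Python) =====
-- def format_clipboard_output(student_name, words):
--     """Format the output for clipboard."""
--     if not words:
--         return f"No learning words found for {student_name}."
--
--     # Sorted distinct (step, level) keys; pick each group's words by a filter pass.
--     parts = [f"Currently Learning — {student_name}"]
--     for step, level in sorted({(s, l) for _, s, l, _ in words}):
--         start_rank = ((step - 1) * 100) + ((level - 1) * 20) + 1
--         end_rank = start_rank + 19
--         parts.append(f"\nStep {step} - Level {level} (Ranks {start_rank}–{end_rank}):")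
--         parts.append(", ".join(w for w, s, l, _ in words if (s, l) == (step, level)))
--     return "\n".join(parts)
-- ===== Notes on version B (the rewrite author's own statement) =====
-- stated objective: simpler
-- what changed: Replaces the dict-of-lists grouping plus sort of items by a sorted set of distinct (step, level) keys with one filter pass per group; no dict is built.
import Mathlib
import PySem

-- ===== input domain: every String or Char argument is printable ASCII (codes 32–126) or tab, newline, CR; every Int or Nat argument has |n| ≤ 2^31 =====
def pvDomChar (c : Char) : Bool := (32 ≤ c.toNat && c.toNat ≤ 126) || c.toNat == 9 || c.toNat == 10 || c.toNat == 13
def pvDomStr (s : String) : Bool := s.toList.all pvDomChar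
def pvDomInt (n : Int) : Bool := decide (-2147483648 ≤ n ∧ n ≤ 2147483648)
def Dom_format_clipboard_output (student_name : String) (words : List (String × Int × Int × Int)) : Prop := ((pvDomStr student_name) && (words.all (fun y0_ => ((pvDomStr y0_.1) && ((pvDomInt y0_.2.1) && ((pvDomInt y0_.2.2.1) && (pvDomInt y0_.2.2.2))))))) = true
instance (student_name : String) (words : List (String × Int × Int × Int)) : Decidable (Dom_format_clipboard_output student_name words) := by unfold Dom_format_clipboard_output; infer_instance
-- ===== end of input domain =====

-- B replaces A's dict-of-lists grouping (plus a sort of its items) by the sorted set of the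
-- distinct (step, level) keys with one filter pass per group; same output, simpler code.


-- ===== PORT A =====
-- grouped = {}; "if key not in grouped: grouped[key] = []" then append; sorted(grouped.items())
-- is a sort by the (step, level) key tuple since dict keys are distinct (Python never compares
-- the list values); the same words are kept in dict insertion order.
def format_clipboard_output (student_name : String) (words : List (String × Int × Int × Int)) : String :=
  if words = [] then
    "No learning words found for " ++ student_name ++ "."
  else
    let grouped : PySem.Dict (Int × Int) (List String) :=
      words.foldl (fun g w =>
        let key := (w.2.1, w.2.2.1)
        let g := if g.contains key then g else g.insert key []
        g.modify key [] (fun l => l ++ [w.1])) PySem.Dict.empty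
    let lines := ["Currently Learning — " ++ student_name]
    let lines := (PySem.List.sorted2 grouped.items (fun p => p.1.1) (fun p => p.1.2)).foldl
      (fun lines p =>
        let step := p.1.1
        let level := p.1.2
        let start_rank := (step - 1) * 100 + (level - 1) * 20 + 1
        let end_rank := start_rank + 19
        let lines := lines ++ ["\nStep " ++ PySem.Int.toStr step ++ " - Level " ++ PySem.Int.toStr level ++
          " (Ranks " ++ PySem.Int.toStr start_rank ++ "–" ++ PySem.Int.toStr end_rank ++ "):"]
        lines ++ [PySem.Str.join ", " p.2]) lines
    PySem.Str.join "\n" lines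


-- ===== PORT B =====
-- sorted({(s, l) for _, s, l, _ in words}): Set.ofList builds the distinct keys, sorted2 orders
-- them by the tuple; one filter pass per group picks its words.
def format_clipboard_output_alt (student_name : String) (words : List (String × Int × Int × Int)) : String :=
  if words = [] then
    "No learning words found for " ++ student_name ++ "."
  else
    let keys := PySem.List.sorted2 (PySem.Set.ofList (words.map (fun w => (w.2.1, w.2.2.1))))
      (fun k => k.1) (fun k => k.2)
    let parts := keys.foldl
      (fun parts k =>
        let step := k.1
        let level := k.2
        let start_rank := (step - 1) * 100 + (level - 1) * 20 + 1
        let end_rank := start_rank + 19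
        parts ++ ["\nStep " ++ PySem.Int.toStr step ++ " - Level " ++ PySem.Int.toStr level ++
          " (Ranks " ++ PySem.Int.toStr start_rank ++ "–" ++ PySem.Int.toStr end_rank ++ "):",
          PySem.Str.join ", " ((words.filter (fun w => (w.2.1, w.2.2.1) == k)).map (fun w => w.1))])
      ["Currently Learning — " ++ student_name]
    PySem.Str.join "\n" parts


-- ===== PRECONDITION & SPEC =====
def Spec_format_clipboard_output (student_name : String) (words : List (String × Int × Int × Int)) (out : String) : Prop := out = format_clipboard_output_alt student_name words
instance (student_name : String) (words : List (String × Int × Int × Int)) (out : String) : Decidable (Spec_format_clipboard_output student_name words out) := by unfold Spec_format_clipboard_output; infer_instance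

-- ===== CLAIM (what is proved, stated in full; the proofs are below) =====
def Claim_equal_format_clipboard_output : Prop := ∀ (student_name : String) (words : List (String × Int × Int × Int)), Dom_format_clipboard_output student_name words → Spec_format_clipboard_output student_name words (format_clipboard_output student_name words)

-- ===== LEMMAS AND PROOFS =====
theorem pv_dict_ext {κ ν : Type} (a b : PySem.Dict κ ν) (h : a.items = b.items) : a = b := by
  cases a; cases b; cases h; rfl

theorem pv_dict_step {κ : Type} [BEq κ] [LawfulBEq κ] (g : PySem.Dict κ (List String)) (k : κ) (s : String) :
    ((if g.contains k then g else g.insert k ([] : List String)).modify k [] (fun l => l ++ [s]))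
      = g.modify k [] (fun l => l ++ [s]) := by
  by_cases h : g.contains k
  · rw [if_pos h]
  · rw [if_neg h]
    have hf : g.contains k = false := by revert h; cases g.contains k <;> simp
    have hx : ∀ p ∈ g.items, (p.1 == k) = false := by
      have h2 : ∀ a b, (a, b) ∈ g.items → ¬ a = k := by
        simpa [PySem.Dict.contains, List.any_eq_false] using hf
      exact fun p hp => beq_eq_false_iff_ne.mpr (h2 p.1 p.2 hp)
    have hins : (g.insert k ([] : List String)).items = g.items ++ [(k, [])] :=
      PySem.Dict.items_insert_of_not_contains _ _ hf
    apply pv_dict_ext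
    unfold PySem.Dict.modify
    rw [PySem.Dict.getD_insert_self, PySem.Dict.getD_of_not_contains _ _ hf,
      PySem.Dict.items_insert_of_contains _ _ (PySem.Dict.contains_insert_self _ _ _),
      PySem.Dict.items_insert_of_not_contains _ _ hf,
      PySem.Dict.items_insert_of_not_contains _ _ hf, List.map_append]
    simp only [List.map_cons, List.map_nil, BEq.rfl, if_pos]
    rw [List.map_congr_left (fun p hp => by rw [if_neg]; simp [hx p hp])]
    simp

theorem pv_items_eq_map_keys {κ ν : Type} [BEq κ] [LawfulBEq κ] (d : PySem.Dict κ ν) (v0 : ν)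
    (h : d.keys.Nodup) : d.items = d.keys.map (fun k => (k, d.getD k v0)) := by
  show d.items = (d.items.map Prod.fst).map (fun k => (k, d.getD k v0))
  rw [List.map_map]
  refine ((List.map_id d.items).symm.trans (List.map_congr_left (fun p hp => ?_)))
  show p = (p.1, d.getD p.1 v0)
  have := PySem.Dict.getD_of_mem_items d (k := p.1) (v := p.2) (by simpa using hp) h v0
  rw [this]

theorem pv_sorted2_eq_sorted_lex {α : Type} (xs : List α) (k1 k2 : α → Int) :
    PySem.List.sorted2 xs k1 k2 = PySem.List.sorted xs (fun x => toLex (k1 x, k2 x)) := by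
  unfold PySem.List.sorted2 PySem.List.sorted
  simp only [if_neg (by simp : ¬ (false = true))]
  congr 1
  funext acc x
  congr 1
  funext a b
  by_cases h1 : k1 a < k1 b <;> by_cases h2 : k1 b < k1 a <;> by_cases h3 : k2 a < k2 b <;>
    simp [h1, h2, h3, Prod.Lex.lt_iff] <;> omega

theorem pv_main_eq (student_name : String) (words : List (String × Int × Int × Int)) :
    format_clipboard_output student_name words = format_clipboard_output_alt student_name words := by
  by_cases hw : words = []
  · simp [format_clipboard_output, format_clipboard_output_alt, hw]
  · unfold format_clipboard_output format_clipboard_output_alt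
    rw [if_neg hw, if_neg hw]
    dsimp only
    have hstepeq : (fun (g : PySem.Dict (Int × Int) (List String)) (w : String × Int × Int × Int) =>
        (if g.contains (w.2.1, w.2.2.1) then g else g.insert (w.2.1, w.2.2.1) []).modify
          (w.2.1, w.2.2.1) [] (fun l => l ++ [w.1]))
        = (fun g w => g.modify (w.2.1, w.2.2.1) [] (fun l => l ++ [w.1])) :=
      funext fun g => funext fun w => pv_dict_step g (w.2.1, w.2.2.1) w.1
    rw [hstepeq]
    set G := words.foldl (fun g w => g.modify (w.2.1, w.2.2.1) [] (fun l => l ++ [w.1]))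
      PySem.Dict.empty with hG
    have hkeys : G.keys = PySem.Set.ofList (words.map (fun w => (w.2.1, w.2.2.1))) := by
      rw [hG, PySem.Dict.keys_foldl_modify_key words (fun w => (w.2.1, w.2.2.1)) []
        (fun _ w => (fun l => l ++ [w.1])) PySem.Dict.empty, PySem.Dict.keys_empty]
      rfl
    have hnodup : G.keys.Nodup := by rw [hkeys]; exact PySem.Set.nodup_ofList _
    have hgetD : ∀ k, G.getD k [] =
        (words.filter (fun w => (w.2.1, w.2.2.1) == k)).map (fun w => w.1) := by
      intro k
      have h := PySem.Dict.getD_foldl_modify_append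
        (words.map (fun w => ((w.2.1, w.2.2.1), w.1))) PySem.Dict.empty k
      rw [List.foldl_map] at h
      simpa [List.filter_map, Function.comp, PySem.Dict.getD_empty] using h
    have hitems : G.items = G.keys.map (fun k => (k, G.getD k [])) :=
      pv_items_eq_map_keys G [] hnodup
    have hDnodup : (PySem.Set.ofList (words.map (fun w => (w.2.1, w.2.2.1)))).Nodup :=
      PySem.Set.nodup_ofList _
    set sk := PySem.List.sorted (PySem.Set.ofList (words.map (fun w => (w.2.1, w.2.2.1))))
      (fun k => toLex (k.1, k.2)) with hsk
    have hskperm : sk.Perm (PySem.Set.ofList (words.map (fun w => (w.2.1, w.2.2.1)))) :=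
      PySem.List.sorted_perm _ _ _
    have hsknodup : sk.Nodup := (hskperm.symm).nodup hDnodup
    have hpair : sk.Pairwise (fun a b => toLex (a.1, a.2) < toLex (b.1, b.2)) := by
      have h1 := PySem.List.sorted_pairwise (PySem.Set.ofList (words.map (fun w => (w.2.1, w.2.2.1))))
        (fun k => toLex (k.1, k.2))
      rw [← hsk] at h1
      refine (h1.and hsknodup).imp ?_
      rintro a b ⟨hle, hne⟩
      refine lt_of_le_of_ne hle (fun he => hne ?_)
      have := toLex_inj.mp he
      rw [Prod.ext_iff] at this
      exact Prod.ext_iff.mpr ⟨this.1, this.2⟩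
    have hsortA : PySem.List.sorted2 G.items (fun p => p.1.1) (fun p => p.1.2)
        = sk.map (fun k => (k, G.getD k [])) := by
      rw [pv_sorted2_eq_sorted_lex]
      apply PySem.List.sorted_eq_of_perm_of_pairwise_lt
      · rw [hitems, hkeys]
        exact (hskperm.map _)
      · rw [List.pairwise_map]
        exact hpair
    rw [hsortA, List.foldl_map, pv_sorted2_eq_sorted_lex, ← hsk]
    congr 1
    congr 1
    funext acc k
    rw [hgetD]
    simp

-- ===== VERDICT (by name: the statement is the Claim_ definition above) =====
theorem format_clipboard_output_spec : Claim_equal_format_clipboard_output :=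
  fun student_name words _ => pv_main_eq student_name words
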